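-- pv_equiv track=rewrite | github.com/fransoaardi/code-competition | kickstart2021/increasing_substring.py | solve
-- ===== SOURCE A (Python) =====
-- def solve(inp):
--     x = list(inp)
--     ans = []
--     last = ""
--     count = 0
--     for w in x:
--         if w <= last:
--             count = 1
--         else:
--             count += 1
--         last = w
--         ans.append(str(count))
--
--     return " ".join(ans)
-- ===== SOURCE B (Python) =====
-- def solve(inp):
--     out = []
--     i, n = 0, len(inp)
--     while i < n:
--         j = i + 1
--         while j < n and inp[j - 1] < inp[j]:
--             j += 1
--         out.extend(str(k + 1) for k in range(j - i))
--         i = j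
--     return " ".join(out)
-- ===== Notes on version B (the rewrite author's own statement) =====
-- stated objective: alternative
-- what changed: Replaces the per-element running accumulator (last char + counter carried through one fold) by a two-pointer scan that locates the end of each maximal increasing run and then emits the labels 1..run-length for the whole run at once.
import Mathlib
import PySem

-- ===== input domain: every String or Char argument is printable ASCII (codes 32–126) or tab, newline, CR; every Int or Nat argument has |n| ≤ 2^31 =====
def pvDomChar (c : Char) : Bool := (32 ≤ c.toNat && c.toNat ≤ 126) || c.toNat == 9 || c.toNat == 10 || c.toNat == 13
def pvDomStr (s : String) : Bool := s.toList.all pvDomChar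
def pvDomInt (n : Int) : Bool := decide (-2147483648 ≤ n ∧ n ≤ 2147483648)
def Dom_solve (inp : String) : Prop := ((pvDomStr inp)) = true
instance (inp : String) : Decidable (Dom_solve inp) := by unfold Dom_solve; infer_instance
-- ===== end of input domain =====

-- B replaces A's per-element running accumulator by a two-pointer scan over maximal
-- increasing runs, emitting the labels 1..run-length per run (alternative decomposition).

-- ===== PORT A =====
-- A's fold state: (ans so far, last as a string = list of chars, count); 'w <= last'
-- is Python string ≤ = lexicographic ≤ on the char lists (exact per the PySem notes).
def solveStep (st : List String × List Char × Int) (w : Char) : List String × List Char × Int :=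
  let count := if [w] ≤ st.2.1 then (1 : Int) else st.2.2 + 1
  (st.1 ++ [PySem.Int.toStr count], [w], count)

def solve (inp : String) : String :=
  let x := inp.toList
  let st := x.foldl solveStep ([], [], 0)
  PySem.Str.join " " st.1

-- ===== PORT B =====
-- inner while: advance j while j < n and inp[j-1] < inp[j]  (j stays in range)
def runEnd (s : List Char) (n j : Nat) : Nat :=
  if j < n ∧ s.getD (j - 1) ' ' < s.getD j ' ' then runEnd s n (j + 1) else j
termination_by n - j
decreasing_by omega

-- outer while: per run emit str(k+1) for k in range(j - i), then i = j
theorem runEnd_ge (s : List Char) (n j : Nat) : j ≤ runEnd s n j := by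
  unfold runEnd
  split
  · have := runEnd_ge s n (j + 1); omega
  · exact le_refl j
termination_by n - j
decreasing_by rename_i h; omega

def outLoop (s : List Char) (n i : Nat) : List String :=
  if i < n then
    ((List.range (runEnd s n (i + 1) - i)).map (fun (k : Nat) => PySem.Int.toStr ((k : Int) + 1)))
      ++ outLoop s n (runEnd s n (i + 1))
  else []
termination_by n - i
decreasing_by rename_i h; have := runEnd_ge s n (i + 1); omega

def solve_alt (inp : String) : String :=
  let s := inp.toList
  PySem.Str.join " " (outLoop s s.length 0)

-- ===== PRECONDITION & SPEC =====
def Spec_solve (inp : String) (out : String) : Prop := out = solve_alt inp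
instance (inp : String) (out : String) : Decidable (Spec_solve inp out) := by unfold Spec_solve; infer_instance

-- ===== CLAIM (what is proved, stated in full; the proofs are below) =====
def Claim_equal_solve : Prop := ∀ (inp : String), Dom_solve inp → Spec_solve inp (solve inp)

-- ===== LEMMAS AND PROOFS =====

theorem runEnd_le (s : List Char) (n j : Nat) (h : j ≤ n) : runEnd s n j ≤ n := by
  unfold runEnd
  split
  · rename_i hc; exact runEnd_le s n (j + 1) hc.1
  · exact h
termination_by n - j
decreasing_by rename_i hc; omega

-- reference: the token list, by structural recursion on the characters
def refFrom : Char → Int → List Char → List String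
  | _, _, [] => []
  | c, k, w :: ws =>
    let k' := if w ≤ c then 1 else k + 1
    PySem.Int.toStr k' :: refFrom w k' ws

def refAll : List Char → List String
  | [] => []
  | w :: ws => PySem.Int.toStr 1 :: refFrom w 1 ws

-- Python's single-char string comparisons, on the list side
theorem singleton_le_singleton (w c : Char) : ([w] ≤ [c]) ↔ w ≤ c := by
  rw [← not_lt, ← not_lt (a := c) (b := w)]
  apply not_congr
  change List.Lex (· < ·) [c] [w] ↔ c < w
  constructor
  · intro h
    cases h with
    | cons h' => cases h'
    | rel h' => exact h'
  · exact fun h => List.Lex.rel h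

theorem singleton_le_nil (w : Char) : ¬ ([w] ≤ ([] : List Char)) := by
  simp only [not_le, List.nil_lt_cons]

-- A's fold emits refFrom
theorem foldA_eq (ws : List Char) : ∀ (ans : List String) (c : Char) (k : Int),
    (ws.foldl solveStep (ans, [c], k)).1 = ans ++ refFrom c k ws := by
  induction ws with
  | nil => intro ans c k; simp [refFrom]
  | cons w ws ih =>
    intro ans c k
    simp only [List.foldl_cons, solveStep, refFrom, singleton_le_singleton]
    by_cases h : w ≤ c <;> simp [h, ih]

theorem solve_eq_ref (inp : String) :
    solve inp = PySem.Str.join " " (refAll inp.toList) := by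
  show PySem.Str.join " " ((inp.toList.foldl solveStep ([], [], 0)).1) = _
  cases h : inp.toList with
  | nil => simp [refAll]
  | cons w ws =>
    simp only [List.foldl_cons, solveStep, refAll]
    rw [if_neg (singleton_le_nil w)]
    norm_num [foldA_eq]

theorem drop_cons_getD (s : List Char) (j : Nat) (h : j < s.length) :
    s.drop j = s.getD j ' ' :: s.drop (j + 1) := by
  rw [List.getD_eq_getElem _ _ h]
  exact List.drop_eq_getElem_cons h

-- the run found by runEnd is exactly one refFrom segment
theorem refFrom_run (s : List Char) (j : Nat) (hj : 1 ≤ j) (hjn : j ≤ s.length) (k : Int) :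
    refFrom (s.getD (j - 1) ' ') k (s.drop j) =
      ((List.range (runEnd s s.length j - j)).map
          (fun (t : Nat) => PySem.Int.toStr (k + 1 + (t : Int))))
        ++ refAll (s.drop (runEnd s s.length j)) := by
  by_cases hc : j < s.length ∧ s.getD (j - 1) ' ' < s.getD j ' '
  · rw [runEnd, if_pos hc]
    obtain ⟨hjlt, hlt⟩ := hc
    rw [drop_cons_getD s j hjlt]
    simp only [refFrom]
    rw [if_neg (not_le.mpr hlt)]
    have ih := refFrom_run s (j + 1) (by omega) (by omega) (k + 1)
    rw [show j + 1 - 1 = j from rfl] at ih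
    rw [ih]
    have hge := runEnd_ge s s.length (j + 1)
    rw [show runEnd s s.length (j + 1) - j = (runEnd s s.length (j + 1) - (j + 1)) + 1 by omega,
      List.range_succ_eq_map]
    simp only [List.map_cons, List.map_map, List.cons_append]
    congr 1
    · norm_num
    · congr 1
      apply List.map_congr_left
      intro t _
      simp only [Function.comp_apply]
      congr 1
      push_cast
      ring
  · rw [runEnd, if_neg hc]
    simp only [Nat.sub_self, List.range_zero, List.map_nil, List.nil_append]
    by_cases hlt : j < s.length
    · have hle : s.getD j ' ' ≤ s.getD (j - 1) ' ' := by
        rcases not_and_or.mp hc with h | h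
        · exact absurd hlt h
        · exact not_lt.mp h
      rw [drop_cons_getD s j hlt]
      simp only [refFrom, refAll]
      rw [if_pos hle]
    · have hd : s.drop j = [] := List.drop_eq_nil_of_le (by omega)
      simp [hd, refFrom, refAll]
termination_by s.length - j
decreasing_by omega

theorem outLoop_eq (s : List Char) (i : Nat) (hi : i ≤ s.length) :
    outLoop s s.length i = refAll (s.drop i) := by
  by_cases h : i < s.length
  · rw [outLoop, if_pos h]
    have hge := runEnd_ge s s.length (i + 1)
    have hle := runEnd_le s s.length (i + 1) (by omega)
    have hr := refFrom_run s (i + 1) (by omega) (by omega) 1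
    rw [show i + 1 - 1 = i from rfl] at hr
    rw [outLoop_eq s (runEnd s s.length (i + 1)) hle]
    rw [drop_cons_getD s i h]
    rw [show refAll (s.getD i ' ' :: s.drop (i + 1))
        = PySem.Int.toStr 1 :: refFrom (s.getD i ' ') 1 (s.drop (i + 1)) from rfl]
    rw [hr]
    rw [show runEnd s s.length (i + 1) - i = (runEnd s s.length (i + 1) - (i + 1)) + 1 by omega,
      List.range_succ_eq_map]
    simp only [List.map_cons, List.map_map, List.cons_append]
    have hmap : List.map ((fun (k : Nat) => PySem.Int.toStr ((k : Int) + 1)) ∘ Nat.succ)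
          (List.range (runEnd s s.length (i + 1) - (i + 1)))
        = List.map (fun (t : Nat) => PySem.Int.toStr (1 + 1 + (t : Int)))
          (List.range (runEnd s s.length (i + 1) - (i + 1))) := by
      apply List.map_congr_left
      intro t _
      simp only [Function.comp_apply]
      congr 1
      push_cast
      ring
    rw [hmap]
    norm_num
  · rw [outLoop, if_neg h]
    have hd : s.drop i = [] := List.drop_eq_nil_of_le (by omega)
    simp [hd, refAll]
termination_by s.length - i
decreasing_by omega

-- ===== VERDICT (by name: the statement is the Claim_ definition above) =====
theorem solve_spec : Claim_equal_solve := by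
  intro inp _
  show solve inp = solve_alt inp
  rw [solve_eq_ref]
  show _ = PySem.Str.join " " (outLoop inp.toList inp.toList.length 0)
  rw [outLoop_eq inp.toList 0 (by omega), List.drop_zero]
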